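-- pv_equiv track=rewrite | github.com/frenetic-lang/pyretic | pyretic/vendor/hsa/utils/wildcard_utils.py | wc_byte_to_int
-- ===== SOURCE A (Python) =====
-- def wc_byte_to_int(b):
--     val = 0
--     for i in range(4):
--         b_shift = b >> (i * 2)
--         next_bit = b_shift & 0x03
--         if (next_bit == 0x02):
--             val = val + 2**i
--         elif (next_bit != 0x01):
--             return None
--     return val
-- ===== SOURCE B (Python) =====
-- def wc_byte_to_int(b):
--     m = b & 0xFF
--     if (m ^ (m >> 1)) & 0x55 != 0x55:
--         return None
--     h = (m >> 1) & 0x55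
--     return (h & 1) | ((h >> 1) & 2) | ((h >> 2) & 4) | ((h >> 3) & 8)
-- ===== Notes on version B (the rewrite author's own statement) =====
-- stated objective: alternative
-- what changed: Replaces A's per-field loop (shift, mask, test each two-bit code, accumulate, early return) with branch-free whole-byte bit arithmetic: one parallel XOR-and-mask test validates all four fields at once, and the result is obtained by compressing the fields' high bits from the even positions down to the low four bits with fixed shifts and masks - no loop and no per-field case analysis.
import Mathlib
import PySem

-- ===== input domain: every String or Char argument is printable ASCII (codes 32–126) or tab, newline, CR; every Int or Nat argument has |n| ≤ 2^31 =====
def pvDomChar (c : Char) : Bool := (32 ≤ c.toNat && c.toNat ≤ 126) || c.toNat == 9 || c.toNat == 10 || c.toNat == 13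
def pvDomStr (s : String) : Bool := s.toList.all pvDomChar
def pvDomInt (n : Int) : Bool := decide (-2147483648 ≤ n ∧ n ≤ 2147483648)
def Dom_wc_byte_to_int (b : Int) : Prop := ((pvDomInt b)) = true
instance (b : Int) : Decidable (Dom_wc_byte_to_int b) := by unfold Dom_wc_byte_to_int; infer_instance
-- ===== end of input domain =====

-- B replaces A's per-field loop (extract each 2-bit code, test, accumulate, early return)
-- by branch-free whole-byte bit arithmetic: one parallel XOR mask test validates all four
-- fields at once, and the result is compressed out of the fields' high bits with fixed
-- shifts and masks; same O(1) cost, a different algorithm (no loop, no per-field case analysis).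

-- ===== PORT A =====
-- loop with early return: state is none once `return None` fired; i ∈ range(4) so
-- (i*2).toNat is exact for Python's `b >> (i*2)` and i.toNat for `2**i`.
def wc_byte_to_int (b : Int) : Option Int :=
  (PySem.List.pyRange 0 4 1).foldl
    (fun st i =>
      match st with
      | none => none
      | some val =>
        let b_shift := b >>> (i * 2).toNat
        let next_bit := PySem.Int.band b_shift 3
        if next_bit = 2 then some (val + 2 ^ i.toNat)
        else if next_bit ≠ 1 then none
        else some val)
    (some 0)

-- ===== PORT B =====
-- branch-free: m = b & 0xFF; valid iff the two bits of every field differ, i.e.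
-- (m ^ (m >> 1)) & 0x55 == 0x55; then compress the high bits (m >> 1) & 0x55 of the
-- four fields from the even bit positions down to the low four bits.
def wc_byte_to_int_alt (b : Int) : Option Int :=
  let m := PySem.Int.band b 255
  if PySem.Int.band (PySem.Int.bxor m (m >>> 1)) 85 ≠ 85 then none
  else
    let h := PySem.Int.band (m >>> 1) 85
    some (PySem.Int.bor
            (PySem.Int.bor (PySem.Int.band h 1) (PySem.Int.band (h >>> 1) 2))
            (PySem.Int.bor (PySem.Int.band (h >>> 2) 4) (PySem.Int.band (h >>> 3) 8)))

-- ===== PRECONDITION & SPEC =====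
def Spec_wc_byte_to_int (b : Int) (out : Option Int) : Prop := out = wc_byte_to_int_alt b
instance (b : Int) (out : Option Int) : Decidable (Spec_wc_byte_to_int b out) := by unfold Spec_wc_byte_to_int; infer_instance

-- ===== CLAIM (what is proved, stated in full; the proofs are below) =====
def Claim_equal_wc_byte_to_int : Prop := ∀ (b : Int), Dom_wc_byte_to_int b → Spec_wc_byte_to_int b (wc_byte_to_int b)

-- ===== LEMMAS AND PROOFS =====
theorem pv_band3 (x : Int) : PySem.Int.band x 3 = x % 4 := by
  unfold PySem.Int.band
  simp only [show (3:Int).toNat = 3 from rfl]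
  split_ifs with h <;>
  · first
    | (have h1 : x.toNat &&& 3 = x.toNat % 4 := by
         simpa using Nat.and_two_pow_sub_one_eq_mod x.toNat 2
       omega)
    | (have h1 : 3 &&& (-x-1).toNat = (-x-1).toNat % 4 := by
         rw [Nat.and_comm]; simpa using Nat.and_two_pow_sub_one_eq_mod (-x-1).toNat 2
       omega)

theorem pv_band255 (x : Int) : PySem.Int.band x 255 = x % 256 := by
  unfold PySem.Int.band
  simp only [show (255:Int).toNat = 255 from rfl]
  split_ifs with h <;>
  · first
    | (have h1 : x.toNat &&& 255 = x.toNat % 256 := by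
         simpa using Nat.and_two_pow_sub_one_eq_mod x.toNat 8
       omega)
    | (have h1 : 255 &&& (-x-1).toNat = (-x-1).toNat % 256 := by
         rw [Nat.and_comm]; simpa using Nat.and_two_pow_sub_one_eq_mod (-x-1).toNat 8
       omega)

-- A's field codes depend only on b mod 256
theorem pv_atom (b : Int) (k : Int) (h0 : 0 ≤ k) (hk : k ≤ 6) :
    PySem.Int.band (b >>> k) 3 = PySem.Int.band ((b % 256) >>> k) 3 := by
  lift k to Nat using h0
  have hk' : k ≤ 6 := by exact_mod_cast hk
  rw [Int.shiftRight_natCast_right, Int.shiftRight_natCast_right, pv_band3, pv_band3,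
      Int.shiftRight_eq_div_pow, Int.shiftRight_eq_div_pow]
  clear hk
  interval_cases k <;> push_cast <;> omega

theorem pv_A_mod (b : Int) : wc_byte_to_int b = wc_byte_to_int (b % 256) := by
  unfold wc_byte_to_int
  simp only [show PySem.List.pyRange 0 4 1 = [0, 1, 2, 3] from by decide, List.foldl]
  norm_num
  simp only [pv_atom b 0 (by omega) (by omega), pv_atom b 2 (by omega) (by omega),
      pv_atom b 4 (by omega) (by omega), pv_atom b 6 (by omega) (by omega)]

theorem pv_B_mod (b : Int) : wc_byte_to_int_alt b = wc_byte_to_int_alt (b % 256) := by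
  unfold wc_byte_to_int_alt
  rw [show PySem.Int.band b 255 = PySem.Int.band (b % 256) 255 from by
    rw [pv_band255, pv_band255]; omega]

set_option maxRecDepth 40000 in
theorem pv_small : ∀ n : Fin 256,
    wc_byte_to_int (n.val : Int) = wc_byte_to_int_alt (n.val : Int) := by decide

-- ===== VERDICT (by name: the statement is the Claim_ definition above) =====
theorem wc_byte_to_int_spec : Claim_equal_wc_byte_to_int := by
  intro b _
  unfold Spec_wc_byte_to_int
  rw [pv_A_mod, pv_B_mod]
  have h : b % 256 = ((b % 256).toNat : Int) := by omega
  rw [h]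
  exact pv_small ⟨(b % 256).toNat, by omega⟩
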